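-- pv_equiv track=rewrite | github.com/WinnerWang971119/Mahjong | backend/engine/scorer.py | _count_concealed_triplets
-- ===== SOURCE A (Python) =====
-- def _is_triplet(s: list[str]) -> bool:
--     """Check if a set of tiles is a triplet (3 identical tiles)."""
--     return len(s) >= 3 and s[0] == s[1] == s[2]
--
-- def _count_concealed_triplets(
--     sets: list[list[str]],
--     is_self_draw: bool,
--     win_tile: str,
-- ) -> int:
--     """Count concealed triplets in the decomposed sets.
--
--     A concealed triplet is one formed entirely from drawn tiles.
--     If winning by discard, one triplet containing the win_tile might
--     not be concealed — but for simplicity, if the set is in the concealed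
--     decomposition and is a triplet, we count it.
--     On discard win, if the win_tile forms a triplet, that triplet is
--     not concealed (the last tile came from another player).
--     """
--     count = 0
--     win_tile_used = False
--     for s in sets:
--         if _is_triplet(s):
--             # On discard, one triplet containing win_tile is not concealed
--             if not is_self_draw and not win_tile_used and s[0] == win_tile:
--                 win_tile_used = True
--                 continue
--             count += 1
--     return count
-- ===== SOURCE B (Python) =====
-- def _is_triplet(s: list[str]) -> bool:
--     """Check if a set of tiles is a triplet (3 identical tiles)."""
--     return len(s) >= 3 and s[0] == s[1] == s[2]
--
-- def _count_concealed_triplets(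
--     sets: list[list[str]],
--     is_self_draw: bool,
--     win_tile: str,
-- ) -> int:
--     # Pass 1: count every triplet.
--     total = sum(1 for s in sets if _is_triplet(s))
--     # Pass 2: on a discard win, one triplet formed on win_tile is not concealed.
--     discard_adjust = (not is_self_draw) and any(
--         _is_triplet(s) and s[0] == win_tile for s in sets
--     )
--     return total - 1 if discard_adjust else total
-- ===== Notes on version B (the rewrite author's own statement) =====
-- stated objective: simpler
-- what changed: Replaces A's single stateful loop (count + win_tile_used skip flag) by two independent passes: count all triplets, then subtract one iff the hand was won by discard and some triplet starts with the win tile.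
import Mathlib
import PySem

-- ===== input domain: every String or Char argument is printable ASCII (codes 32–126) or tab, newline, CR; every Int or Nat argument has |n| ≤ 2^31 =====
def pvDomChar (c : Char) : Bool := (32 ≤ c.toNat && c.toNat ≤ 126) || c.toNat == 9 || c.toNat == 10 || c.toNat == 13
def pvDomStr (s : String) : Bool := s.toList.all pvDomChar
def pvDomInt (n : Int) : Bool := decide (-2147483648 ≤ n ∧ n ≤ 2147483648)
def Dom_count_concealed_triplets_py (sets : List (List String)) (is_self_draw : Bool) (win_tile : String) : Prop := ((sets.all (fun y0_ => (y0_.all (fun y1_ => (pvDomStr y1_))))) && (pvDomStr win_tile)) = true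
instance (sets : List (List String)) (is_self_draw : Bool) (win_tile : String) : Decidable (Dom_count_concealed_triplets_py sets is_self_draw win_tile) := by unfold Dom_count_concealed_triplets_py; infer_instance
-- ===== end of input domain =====

-- B replaces A's single stateful loop (count plus a win_tile_used skip flag) by two
-- independent passes — count all triplets, then subtract one iff won by discard and
-- some triplet starts with the win tile — for simplicity (objective: simpler).

-- ===== PORT A =====
-- shared helper: Python _is_triplet (len(s) >= 3 and s[0] == s[1] == s[2])
def pvIsTriplet (s : List String) : Bool :=
  decide (3 ≤ s.length) &&
    ((PySem.List.pyGet? s 0 == PySem.List.pyGet? s 1) && (PySem.List.pyGet? s 1 == PySem.List.pyGet? s 2))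

-- A's loop body over state (count, win_tile_used)
def pvAStep (is_self_draw : Bool) (win_tile : String) (st : Int × Bool) (s : List String) : Int × Bool :=
  if pvIsTriplet s then
    if !is_self_draw && !st.2 && (PySem.List.pyGet? s 0 == some win_tile) then
      (st.1, true)
    else
      (st.1 + 1, st.2)
  else st

def count_concealed_triplets_py (sets : List (List String)) (is_self_draw : Bool) (win_tile : String) : Int :=
  (sets.foldl (pvAStep is_self_draw win_tile) (0, false)).1

-- ===== PORT B =====
def count_concealed_triplets_py_alt (sets : List (List String)) (is_self_draw : Bool) (win_tile : String) : Int :=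
  let total : Int := (sets.countP pvIsTriplet : Int)
  let discard_adjust : Bool :=
    !is_self_draw && sets.any (fun s => pvIsTriplet s && (PySem.List.pyGet? s 0 == some win_tile))
  if discard_adjust then total - 1 else total

-- ===== PRECONDITION & SPEC =====
def Spec_count_concealed_triplets_py (sets : List (List String)) (is_self_draw : Bool) (win_tile : String) (out : Int) : Prop := out = count_concealed_triplets_py_alt sets is_self_draw win_tile
instance (sets : List (List String)) (is_self_draw : Bool) (win_tile : String) (out : Int) : Decidable (Spec_count_concealed_triplets_py sets is_self_draw win_tile out) := by unfold Spec_count_concealed_triplets_py; infer_instance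

-- ===== CLAIM (what is proved, stated in full; the proofs are below) =====
def Claim_equal_count_concealed_triplets_py : Prop := ∀ (sets : List (List String)) (is_self_draw : Bool) (win_tile : String), Dom_count_concealed_triplets_py sets is_self_draw win_tile → Spec_count_concealed_triplets_py sets is_self_draw win_tile (count_concealed_triplets_py sets is_self_draw win_tile)

-- ===== LEMMAS AND PROOFS =====

-- once the flag is set, the loop just counts every remaining triplet
lemma pvFold_true (is_self_draw : Bool) (win_tile : String) :
    ∀ (sets : List (List String)) (c : Int),
      (sets.foldl (pvAStep is_self_draw win_tile) (c, true)).1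
        = c + (sets.countP pvIsTriplet : Int) := by
  intro sets
  induction sets with
  | nil => intro c; simp
  | cons s ss ih =>
    intro c
    by_cases h : pvIsTriplet s = true <;>
      simp [pvAStep, h, ih]; ring

-- with the flag unset, the loop's count is total triplets minus the one suppressed unit
lemma pvFold_false (is_self_draw : Bool) (win_tile : String) :
    ∀ (sets : List (List String)) (c : Int),
      (sets.foldl (pvAStep is_self_draw win_tile) (c, false)).1
        = c + (sets.countP pvIsTriplet : Int)
          - (if !is_self_draw && sets.any (fun s => pvIsTriplet s && (PySem.List.pyGet? s 0 == some win_tile)) then 1 else 0) := by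
  intro sets
  induction sets with
  | nil => intro c; simp
  | cons s ss ih =>
    intro c
    by_cases h : pvIsTriplet s = true
    · by_cases hskip : (!is_self_draw && !false && (PySem.List.pyGet? s 0 == some win_tile)) = true
      · -- the skip branch fires: flag becomes true, remaining triplets all count
        have hsd : is_self_draw = false := by
          cases is_self_draw <;> simp_all
        have heq : (PySem.List.pyGet? s 0 == some win_tile) = true := by
          simp_all
        simp [pvAStep, h, pvFold_true, hsd, heq]
        ring
      · -- no skip: count this triplet; the any-condition is unchanged on the tail
        cases is_self_draw with
        | true =>
          simp [pvAStep, h, ih]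
          ring
        | false =>
          have heq : (PySem.List.pyGet? s 0 == some win_tile) = false := by
            cases hc : (PySem.List.pyGet? s 0 == some win_tile) <;> simp_all
          simp [pvAStep, h, ih, heq]
          ring
    · have h' : pvIsTriplet s = false := by simp_all
      simp [pvAStep, h', ih]

-- ===== VERDICT (by name: the statement is the Claim_ definition above) =====
theorem count_concealed_triplets_py_spec : Claim_equal_count_concealed_triplets_py := by
  intro sets is_self_draw win_tile _
  unfold Spec_count_concealed_triplets_py count_concealed_triplets_py count_concealed_triplets_py_alt
  rw [pvFold_false]
  by_cases h : (!is_self_draw && sets.any (fun s => pvIsTriplet s && (PySem.List.pyGet? s 0 == some win_tile))) = true <;>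
    simp [h]
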